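-- pv_equiv track=rewrite | github.com/danshaes/Cyclic-Character-Mapping-CCMa- | cycle.py | getGeneratorPoint
-- ===== SOURCE A (Python) =====
-- import math
--
-- def avarage(password):
--     sum=0
--     appended=[]
--     for char in password:
--         value=ord(char)
--         appended.append(value)
--         sum+=value
--
--     return (sum//len(password))
--
-- def pascalValue(password):
--     nValue=len(password)
--     rValue=nValue
--     sum=0
--     for value in password:
--         numerator=(math.factorial(nValue))
--         denominator=(math.factorial(nValue - rValue)) * (math.factorial(rValue))
--         comb=numerator//denominator
--         modulo=(ord(value) * comb) % 61
--         rValue-=1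
--         sum+=modulo
--     return sum % 61
--
-- def getRandomPoint(prevCord, grad, modulo):
--     xCord=(prevCord[0]**2) + (prevCord[1]**2) + (10 * prevCord[0]) + (12 * prevCord[1])
--     xCord=(xCord % 22) - (modulo//2)
--     yCord=((grad * xCord) - ((grad * prevCord[0]) - prevCord[1]))
--     yCord=(yCord % 22) - (modulo//2)+1
--     xyCord=[xCord, yCord]
--     return  xyCord
--
-- def getGeneratorPoint(password, modulo):
--     x=avarage(password) % modulo
--     y=pascalValue(password) % modulo
--     prevCord=[x,y]
--     for char in password:
--         grad=ord(char)
--         newCord=getRandomPoint(prevCord, grad, modulo)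
--         prevCord[0], prevCord[1] = newCord[0], newCord[1]
--
--     return prevCord
-- ===== SOURCE B (Python) =====
-- def getGeneratorPoint(password, modulo):
--     codes = [ord(c) for c in password]
--     n = len(codes)
--     x = (sum(codes) // n) % modulo
--     # Pascal row incrementally: comb = C(n, i), updated in O(1) per step
--     comb, s = 1, 0
--     for i, v in enumerate(codes):
--         s = (s + v * comb) % 61
--         comb = comb * (n - i) // (i + 1)
--     y = s % modulo
--     half = modulo // 2
--     px, py = x, y
--     for g in codes:
--         nx = (px * (px + 10) + py * (py + 12)) % 22 - half
--         py = (g * (nx - px) + py) % 22 - half + 1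
--         px = nx
--     return [px, py]
-- ===== Notes on version B (the rewrite author's own statement) =====
-- stated objective: faster
-- what changed: Replaces per-character big-int factorial recomputation with an incremental Pascal-row update (comb = C(n,i) updated in O(1) per step) and a running sum reduced mod 61, folding once over precomputed character codes instead of the mutated-list helper chain.
import Mathlib
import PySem

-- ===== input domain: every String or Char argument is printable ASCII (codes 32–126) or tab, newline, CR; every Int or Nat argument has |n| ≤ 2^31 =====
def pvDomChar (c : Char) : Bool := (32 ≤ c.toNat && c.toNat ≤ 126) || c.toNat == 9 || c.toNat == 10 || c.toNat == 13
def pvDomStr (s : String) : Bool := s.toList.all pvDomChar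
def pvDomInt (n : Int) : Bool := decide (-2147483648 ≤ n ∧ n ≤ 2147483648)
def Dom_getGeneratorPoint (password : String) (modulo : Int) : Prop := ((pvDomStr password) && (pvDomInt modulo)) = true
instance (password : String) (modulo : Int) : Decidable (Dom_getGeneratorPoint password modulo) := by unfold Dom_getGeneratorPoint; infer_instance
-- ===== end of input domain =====

-- B replaces A's per-character factorial recomputation with an incremental Pascal-row
-- update (comb = C(n,i) maintained in O(1) per step), a running sum reduced mod 61, and a
-- single fold over the character codes; objective: faster (no big-int factorials).

-- ===== PORT A =====
def factA : Nat → Nat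
  | 0 => 1
  | n + 1 => (n + 1) * factA n

def avarageA (cs : List Char) : Int :=
  let st := cs.foldl (fun (st : Int × List Int) c =>
    (st.1 + (c.toNat : Int), st.2 ++ [(c.toNat : Int)])) (0, [])
  PySem.Int.floordiv st.1 (cs.length : Int)

def pascalA (cs : List Char) : Nat :=
  let n := cs.length
  let st := cs.foldl (fun (st : Nat × Nat) c =>
    let comb := factA n / (factA (n - st.1) * factA st.1)
    (st.1 - 1, st.2 + (c.toNat * comb) % 61)) (n, 0)
  st.2 % 61

def getRandomPointA (prev : Int × Int) (grad modulo : Int) : Int × Int :=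
  let xCord := PySem.Int.mod (prev.1 ^ 2 + prev.2 ^ 2 + 10 * prev.1 + 12 * prev.2) 22
      - PySem.Int.floordiv modulo 2
  let yCord := PySem.Int.mod (grad * xCord - (grad * prev.1 - prev.2)) 22
      - PySem.Int.floordiv modulo 2 + 1
  (xCord, yCord)

def getGeneratorPoint (password : String) (modulo : Int) : List Int :=
  let cs := password.toList
  let x := PySem.Int.mod (avarageA cs) modulo
  let y := PySem.Int.mod ((pascalA cs : Int)) modulo
  let p := cs.foldl (fun prev c => getRandomPointA prev (c.toNat : Int) modulo) (x, y)
  [p.1, p.2]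

-- ===== PORT B =====
def getGeneratorPoint_alt (password : String) (modulo : Int) : List Int :=
  let codes := password.toList.map (fun c => (c.toNat : Int))
  let n : Int := (codes.length : Int)
  let x := PySem.Int.mod (PySem.Int.floordiv (codes.foldl (· + ·) 0) n) modulo
  -- state (i, comb, s): comb is the Pascal-row entry C(n, i), s the running sum mod 61
  let st := codes.foldl (fun (st : Int × Int × Int) v =>
      (st.1 + 1,
       PySem.Int.floordiv (st.2.1 * (n - st.1)) (st.1 + 1),
       PySem.Int.mod (st.2.2 + v * st.2.1) 61)) (0, 1, 0)
  let y := PySem.Int.mod st.2.2 modulo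
  let half := PySem.Int.floordiv modulo 2
  let p := codes.foldl (fun (pr : Int × Int) g =>
      let nx := PySem.Int.mod (pr.1 * (pr.1 + 10) + pr.2 * (pr.2 + 12)) 22 - half
      (nx, PySem.Int.mod (g * (nx - pr.1) + pr.2) 22 - half + 1)) (x, y)
  [p.1, p.2]

-- ===== PRECONDITION & SPEC =====
-- Pre_ excludes the empty password (A's avarage divides by len(password): ZeroDivisionError)
-- and modulo = 0 (x % modulo raises ZeroDivisionError).
def Pre_getGeneratorPoint (password : String) (modulo : Int) : Prop :=
  password.toList ≠ [] ∧ modulo ≠ 0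
instance (password : String) (modulo : Int) : Decidable (Pre_getGeneratorPoint password modulo) := by
  unfold Pre_getGeneratorPoint; infer_instance
def pvWitness_getGeneratorPoint : String × Int := ("abc", 7)

def Spec_getGeneratorPoint (password : String) (modulo : Int) (out : List Int) : Prop := out = getGeneratorPoint_alt password modulo
instance (password : String) (modulo : Int) (out : List Int) : Decidable (Spec_getGeneratorPoint password modulo out) := by unfold Spec_getGeneratorPoint; infer_instance

-- ===== CLAIM (what is proved, stated in full; the proofs are below) =====
def Claim_equal_getGeneratorPoint : Prop := ∀ (password : String) (modulo : Int), Dom_getGeneratorPoint password modulo → Pre_getGeneratorPoint password modulo → Spec_getGeneratorPoint password modulo (getGeneratorPoint password modulo)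

-- ===== LEMMAS AND PROOFS =====

theorem factA_eq (n : Nat) : factA n = n.factorial := by
  induction n with
  | zero => rfl
  | succ k ih => simp [factA, Nat.factorial, ih]

-- A's avarage accumulator: the dead `appended` list does not affect the sum component
theorem avg_fold_fst (cs : List Char) : ∀ (a : Int) (l : List Int),
    (cs.foldl (fun (st : Int × List Int) c =>
      (st.1 + (c.toNat : Int), st.2 ++ [(c.toNat : Int)])) (a, l)).1
    = cs.foldl (fun (s : Int) c => s + (c.toNat : Int)) a := by
  induction cs with
  | nil => intro a l; rfl
  | cons c cs ih => intro a l; simp [List.foldl_cons, ih]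

theorem avarage_eq (cs : List Char) :
    avarageA cs
      = PySem.Int.floordiv ((cs.map (fun c => (c.toNat : Int))).foldl (· + ·) 0)
          ((cs.map (fun c => (c.toNat : Int))).length : Int) := by
  simp [avarageA, avg_fold_fst, List.foldl_map]

-- Pascal-loop invariant: B's incremental state (i, C(n,i), sA % 61) tracks A's (n-i, sA)
theorem pascal_loop (n : Nat) (cs : List Char) : ∀ (i sA : Nat), i + cs.length ≤ n →
    ((cs.map (fun c => (c.toNat : Int))).foldl
        (fun (st : Int × Int × Int) v =>
          (st.1 + 1,
           PySem.Int.floordiv (st.2.1 * ((n : Int) - st.1)) (st.1 + 1),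
           PySem.Int.mod (st.2.2 + v * st.2.1) 61))
        ((i : Int), ((n.choose i : Nat) : Int), ((sA % 61 : Nat) : Int))).2.2
    = (((cs.foldl (fun (st : Nat × Nat) c =>
          (st.1 - 1, st.2 + (c.toNat * (factA n / (factA (n - st.1) * factA st.1))) % 61))
          (n - i, sA)).2 % 61 : Nat) : Int) := by
  induction cs with
  | nil => intro i sA _; rfl
  | cons c cs ih =>
    intro i sA hle
    simp only [List.map_cons, List.foldl_cons]
    have hin : i < n := by simp at hle; omega
    -- A's comb at this step is C(n, n-i) = C(n, i)
    have hA : factA n / (factA (n - (n - i)) * factA (n - i)) = n.choose i := by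
      rw [factA_eq, factA_eq, factA_eq, Nat.sub_sub_self (le_of_lt hin)]
      rw [Nat.choose_eq_factorial_div_factorial (le_of_lt hin)]
    -- B's comb update: C(n,i) * (n - i) // (i + 1) = C(n, i+1)
    have hcast : (n : Int) - (i : Int) = ((n - i : Nat) : Int) := by
      push_cast [Nat.cast_sub (le_of_lt hin)]; ring
    have hB : PySem.Int.floordiv (((n.choose i : Nat) : Int) * ((n : Int) - (i : Int))) ((i : Int) + 1)
        = ((n.choose (i + 1) : Nat) : Int) := by
      rw [hcast]
      have : ((n.choose i : Nat) : Int) * ((n - i : Nat) : Int) = ((n.choose i * (n - i) : Nat) : Int) := by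
        push_cast; ring
      rw [this]
      have h1 : ((i : Int) + 1) = ((i + 1 : Nat) : Int) := by push_cast; ring
      rw [h1, PySem.Int.floordiv_natCast]
      rw [← Nat.choose_succ_right_eq, Nat.mul_div_cancel _ (Nat.succ_pos i)]
    -- B's sum update
    have hS : PySem.Int.mod (((sA % 61 : Nat) : Int) + (c.toNat : Int) * ((n.choose i : Nat) : Int)) 61
        = (((sA + (c.toNat * n.choose i) % 61) % 61 : Nat) : Int) := by
      have : ((sA % 61 : Nat) : Int) + (c.toNat : Int) * ((n.choose i : Nat) : Int)
          = ((sA % 61 + c.toNat * n.choose i : Nat) : Int) := by push_cast; ring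
      rw [this]
      have h61 : (61 : Int) = ((61 : Nat) : Int) := by norm_num
      rw [h61, PySem.Int.mod_natCast]
      congr 1
      generalize c.toNat * n.choose i = x
      omega
    have hi1 : ((i : Int) + 1) = ((i + 1 : Nat) : Int) := by push_cast; ring
    rw [hA, hB, hS, hi1]
    have hr : n - i - 1 = n - (i + 1) := by omega
    rw [hr]
    exact ih (i + 1) (sA + (c.toNat * n.choose i) % 61) (by simp at hle ⊢; omega)

theorem pascal_eq (cs : List Char) :
    ((cs.map (fun c => (c.toNat : Int))).foldl
        (fun (st : Int × Int × Int) v =>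
          (st.1 + 1,
           PySem.Int.floordiv (st.2.1 * (((cs.map (fun c => (c.toNat : Int))).length : Int) - st.1)) (st.1 + 1),
           PySem.Int.mod (st.2.2 + v * st.2.1) 61)) (0, 1, 0)).2.2
    = ((pascalA cs : Nat) : Int) := by
  have h := pascal_loop cs.length cs 0 0 (by omega)
  simp only [Nat.choose_zero_right, Nat.sub_zero, Nat.zero_mod, Nat.cast_zero, Nat.cast_one] at h
  simpa [pascalA, List.length_map] using h

-- the two iteration steps compute the same pair
theorem step_eq (modulo : Int) (pr : Int × Int) (g : Int) :
    getRandomPointA pr g modulo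
    = (let nx := PySem.Int.mod (pr.1 * (pr.1 + 10) + pr.2 * (pr.2 + 12)) 22 - PySem.Int.floordiv modulo 2
       (nx, PySem.Int.mod (g * (nx - pr.1) + pr.2) 22 - PySem.Int.floordiv modulo 2 + 1)) := by
  simp only [getRandomPointA]
  have h1 : pr.1 ^ 2 + pr.2 ^ 2 + 10 * pr.1 + 12 * pr.2
      = pr.1 * (pr.1 + 10) + pr.2 * (pr.2 + 12) := by ring
  rw [h1]
  have h2 : ∀ x : Int, g * x - (g * pr.1 - pr.2) = g * (x - pr.1) + pr.2 := by intro x; ring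
  rw [h2]

-- ===== VERDICT (by name: the statement is the Claim_ definition above) =====
theorem getGeneratorPoint_spec : Claim_equal_getGeneratorPoint := by
  intro password modulo _ _
  unfold Spec_getGeneratorPoint getGeneratorPoint getGeneratorPoint_alt
  simp only []
  rw [avarage_eq, pascal_eq]
  simp only [List.foldl_map, step_eq]
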